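-- pv_equiv track=rewrite | github.com/Steelio/TextToRegionalEmoji | main.py | ironmaceHatesMe
-- ===== SOURCE A (Python) =====
-- char_to_emoji = {
--     'a': ':regional_indicator_a:',
--     'b': ':regional_indicator_b:',
--     'c': ':regional_indicator_c:',
--     'd': ':regional_indicator_d:',
--     'e': ':regional_indicator_e:',
--     'f': ':regional_indicator_f:',
--     'g': ':regional_indicator_g:',
--     'h': ':regional_indicator_h:',
--     'i': ':regional_indicator_i:',
--     'j': ':regional_indicator_j:',
--     'k': ':regional_indicator_k:',
--     'l': ':regional_indicator_l:',
--     'm': ':regional_indicator_m:',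
--     'n': ':regional_indicator_n:',
--     'o': ':regional_indicator_o:',
--     'p': ':regional_indicator_p:',
--     'q': ':regional_indicator_q:',
--     'r': ':regional_indicator_r:',
--     's': ':regional_indicator_s:',
--     't': ':regional_indicator_t:',
--     'u': ':regional_indicator_u:',
--     'v': ':regional_indicator_v:',
--     'w': ':regional_indicator_w:',
--     'x': ':regional_indicator_x:',
--     'y': ':regional_indicator_y:',
--     'z': ':regional_indicator_z:',
-- }
--
-- def ironmaceHatesMe(text):
--     text = text.lower()  # Convert text to lowercase
--     lines = text.split('|')  # Split text into lines at '|' characters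
--     transformed_lines = []
--
--     for line in lines:
--         transformed_text = []
--         for char in line:
--             if char in char_to_emoji:
--                 transformed_text.append(char_to_emoji[char])
--             else:
--                 transformed_text.append(char)  # Keep non-alphabetical characters as-is
--         transformed_lines.append(''.join(transformed_text))
--
--     return '\n'.join(transformed_lines)
-- ===== SOURCE B (Python) =====
-- # No table at all: the emoji name is derived from the letter itself, so one flat
-- # pass over text.lower() suffices ('|' becomes '\n', letters become
-- # ':regional_indicator_<letter>:', everything else passes through).
-- def ironmaceHatesMe(text):
--     pieces = []
--     for ch in text.lower():
--         if 'a' <= ch <= 'z':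
--             pieces.append(':regional_indicator_' + ch + ':')
--         elif ch == '|':
--             pieces.append('\n')
--         else:
--             pieces.append(ch)
--     return ''.join(pieces)
-- ===== Notes on version B (the rewrite author's own statement) =====
-- stated objective: simpler
-- what changed: Dropped both the 26-entry lookup table and the split('|')/nested per-line loop/'\n'.join pipeline: B does one flat pass over text.lower() and builds ':regional_indicator_<c>:' from the letter itself by string concatenation, mapping '|' to '\n' inline.
import Mathlib
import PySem

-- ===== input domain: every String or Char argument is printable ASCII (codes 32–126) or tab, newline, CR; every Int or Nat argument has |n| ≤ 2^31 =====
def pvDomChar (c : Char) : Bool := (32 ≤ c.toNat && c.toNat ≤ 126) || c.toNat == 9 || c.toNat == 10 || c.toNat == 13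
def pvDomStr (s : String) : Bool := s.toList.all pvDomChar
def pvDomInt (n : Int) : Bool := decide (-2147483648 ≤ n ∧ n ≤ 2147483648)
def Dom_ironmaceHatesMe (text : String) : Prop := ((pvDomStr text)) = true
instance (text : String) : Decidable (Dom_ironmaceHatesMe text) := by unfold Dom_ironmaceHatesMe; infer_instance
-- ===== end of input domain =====

-- B drops A's 26-entry lookup table and the split('|')/nested-loop/'\n'.join pipeline: one flat
-- pass over text.lower() that builds ':regional_indicator_<c>:' from the letter itself (objective: simpler).

-- ===== PORT A =====
-- the module-level char_to_emoji dict
def charToEmoji : PySem.Dict Char (List Char) := PySem.Dict.mk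
  [ ('a', ":regional_indicator_a:".toList), ('b', ":regional_indicator_b:".toList),
    ('c', ":regional_indicator_c:".toList), ('d', ":regional_indicator_d:".toList),
    ('e', ":regional_indicator_e:".toList), ('f', ":regional_indicator_f:".toList),
    ('g', ":regional_indicator_g:".toList), ('h', ":regional_indicator_h:".toList),
    ('i', ":regional_indicator_i:".toList), ('j', ":regional_indicator_j:".toList),
    ('k', ":regional_indicator_k:".toList), ('l', ":regional_indicator_l:".toList),
    ('m', ":regional_indicator_m:".toList), ('n', ":regional_indicator_n:".toList),
    ('o', ":regional_indicator_o:".toList), ('p', ":regional_indicator_p:".toList),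
    ('q', ":regional_indicator_q:".toList), ('r', ":regional_indicator_r:".toList),
    ('s', ":regional_indicator_s:".toList), ('t', ":regional_indicator_t:".toList),
    ('u', ":regional_indicator_u:".toList), ('v', ":regional_indicator_v:".toList),
    ('w', ":regional_indicator_w:".toList), ('x', ":regional_indicator_x:".toList),
    ('y', ":regional_indicator_y:".toList), ('z', ":regional_indicator_z:".toList) ]

def ironmaceHatesMe (text : String) : String :=
  let t := PySem.Chars.lower text.toList                 -- text = text.lower()
  let lines := PySem.Chars.splitOn t ['|']               -- lines = text.split('|')
  let transformedLines :=                                -- for line in lines: inner loop; append ''.join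
    lines.foldl (fun acc line =>
      acc ++ [PySem.Chars.join []
        (line.foldl (fun ts c =>
          ts ++ [if charToEmoji.contains c then charToEmoji.getD c [] else [c]]) [])]) []
  String.mk (PySem.Chars.join ['\n'] transformedLines)   -- '\n'.join(transformed_lines)

-- ===== PORT B =====
-- the loop body: 'a' <= ch <= 'z' → build the emoji name from ch; '|' → '\n'; else ch itself
def pvEmit (c : Char) : List Char :=
  if 'a' ≤ c ∧ c ≤ 'z' then ":regional_indicator_".toList ++ [c] ++ [':']
  else if c = '|' then ['\n']
  else [c]

def ironmaceHatesMe_alt (text : String) : String :=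
  String.mk (PySem.Chars.join [] ((PySem.Chars.lower text.toList).map pvEmit))

-- ===== PRECONDITION & SPEC =====
def Spec_ironmaceHatesMe (text : String) (out : String) : Prop := out = ironmaceHatesMe_alt text
instance (text : String) (out : String) : Decidable (Spec_ironmaceHatesMe text out) := by unfold Spec_ironmaceHatesMe; infer_instance

-- ===== CLAIM (what is proved, stated in full; the proofs are below) =====
def Claim_equal_ironmaceHatesMe : Prop := ∀ (text : String), Dom_ironmaceHatesMe text → Spec_ironmaceHatesMe text (ironmaceHatesMe text)

-- ===== LEMMAS AND PROOFS =====

-- A's per-character transform inside a line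
def pvH (c : Char) : List Char :=
  if charToEmoji.contains c then charToEmoji.getD c [] else [c]

theorem pvEmit_pipe : pvEmit '|' = ['\n'] := by decide

-- on ASCII, B's constructed emoji agrees with A's table lookup (checked over all 128 codes)
theorem pvEmit_eq (c : Char) (h : c.toNat < 128) (hne : c ≠ '|') : pvEmit c = pvH c := by
  have hall : ((List.range 128).all fun n =>
      decide (Char.ofNat n = '|') || decide (pvEmit (Char.ofNat n) = pvH (Char.ofNat n))) = true := by
    decide
  have hm : c.toNat ∈ List.range 128 := List.mem_range.mpr h
  have := List.all_eq_true.mp hall _ hm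
  rw [Char.ofNat_toNat] at this
  rcases Bool.or_eq_true_iff.mp this with h' | h'
  · exact absurd (of_decide_eq_true h') hne
  · exact of_decide_eq_true h'

-- lowercasing keeps ASCII codes below 128 (checked over all 128 codes)
theorem pvLowerChar_lt (c : Char) (h : c.toNat < 128) : (PySem.Chars.lowerChar c).toNat < 128 := by
  have hall : ((List.range 128).all fun n =>
      decide ((PySem.Chars.lowerChar (Char.ofNat n)).toNat < 128)) = true := by decide
  have hm : c.toNat ∈ List.range 128 := List.mem_range.mpr h
  have := List.all_eq_true.mp hall _ hm
  rw [Char.ofNat_toNat] at this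
  exact of_decide_eq_true this

-- reference single-pass splitter on '|'
def pvSplit0 : List Char → List (List Char)
  | [] => [[]]
  | c :: rest =>
    if c = '|' then [] :: pvSplit0 rest
    else match pvSplit0 rest with
      | [] => [[c]]
      | p :: ps => (c :: p) :: ps

theorem pvSplit0_ne_nil (cs : List Char) : pvSplit0 cs ≠ [] := by
  cases cs with
  | nil => simp [pvSplit0]
  | cons c rest =>
    simp only [pvSplit0]
    split
    · simp
    · split <;> simp

theorem pvGo_eq (cs : List Char) : ∀ (fuel : Nat) (cur : List Char) (acc : List (List Char)),
    cs.length < fuel →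
    PySem.Chars.splitOn.go ['|'] fuel cs cur acc =
      acc.reverse ++ (cur.reverse ++ (pvSplit0 cs).headI) :: (pvSplit0 cs).tail := by
  induction cs with
  | nil =>
    intro fuel cur acc hf
    match fuel, hf with
    | fuel + 1, _ => simp [PySem.Chars.splitOn.go, pvSplit0]
  | cons c rest ih =>
    intro fuel cur acc hf
    match fuel, hf with
    | fuel + 1, hf =>
      by_cases hc : c = '|'
      · subst hc
        have : (['|'].isPrefixOf ('|' :: rest)) = true := by simp
        simp only [PySem.Chars.splitOn.go, this, if_true, List.length_cons, List.length_nil,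
          List.drop_succ_cons, List.drop_zero]
        rw [ih fuel [] (cur.reverse :: acc) (by simpa using Nat.lt_of_succ_lt_succ hf)]
        rcases hsp : pvSplit0 rest with _ | ⟨p, ps⟩
        · exact absurd hsp (pvSplit0_ne_nil rest)
        · simp [pvSplit0, hsp]
      · have : (['|'].isPrefixOf (c :: rest)) = false := by
          simp [List.isPrefixOf]; exact fun h => hc h.symm
        simp only [PySem.Chars.splitOn.go, this, Bool.false_eq_true, if_false]
        rw [ih fuel (c :: cur) acc (by simpa using Nat.lt_of_succ_lt_succ hf)]
        simp only [pvSplit0, if_neg hc]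
        rcases h : pvSplit0 rest with _ | ⟨p, ps⟩
        · exact absurd h (pvSplit0_ne_nil rest)
        · simp

theorem pvSplitOn_eq (cs : List Char) : PySem.Chars.splitOn cs ['|'] = pvSplit0 cs := by
  rw [PySem.Chars.splitOn, pvGo_eq cs (cs.length + 1) [] [] (Nat.lt_succ_self _)]
  rcases h : pvSplit0 cs with _ | ⟨p, ps⟩
  · exact absurd h (pvSplit0_ne_nil cs)
  · simp

theorem pvJoin_nil_flatten (ps : List (List Char)) :
    PySem.Chars.join [] ps = ps.flatten := by
  induction ps with
  | nil => simp [PySem.Chars.join_nil]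
  | cons p ps ih =>
    cases ps with
    | nil => simp [PySem.Chars.join_singleton]
    | cons q rest => rw [PySem.Chars.join_cons_cons]; simp_all

theorem pvJoin_append_head (sep a x : List Char) (xs : List (List Char)) :
    PySem.Chars.join sep ((a ++ x) :: xs) = a ++ PySem.Chars.join sep (x :: xs) := by
  cases xs with
  | nil => rw [PySem.Chars.join_singleton, PySem.Chars.join_singleton]
  | cons q rest =>
    rw [PySem.Chars.join_cons_cons, PySem.Chars.join_cons_cons]
    simp [List.append_assoc]

theorem pvMain (cs : List Char) (hcs : ∀ c ∈ cs, c.toNat < 128) :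
    PySem.Chars.join ['\n'] ((pvSplit0 cs).map (fun l => (l.map pvH).flatten)) =
      (cs.map pvEmit).flatten := by
  induction cs with
  | nil => simp [pvSplit0, PySem.Chars.join_singleton]
  | cons c rest ih =>
    have hc128 : c.toNat < 128 := hcs c (by simp)
    have hrest : ∀ x ∈ rest, x.toNat < 128 := fun x hx => hcs x (by simp [hx])
    by_cases hc : c = '|'
    · subst hc
      simp only [pvSplit0, if_true]
      rcases h : pvSplit0 rest with _ | ⟨p, ps⟩
      · exact absurd h (pvSplit0_ne_nil rest)
      · rw [h] at ih
        simp only [List.map_cons, List.map_nil, List.flatten_nil, PySem.Chars.join_cons_cons,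
          List.nil_append]
        simp only [List.map_cons] at ih
        rw [ih hrest]
        simp [pvEmit_pipe]
    · simp only [pvSplit0, if_neg hc]
      rcases h : pvSplit0 rest with _ | ⟨p, ps⟩
      · exact absurd h (pvSplit0_ne_nil rest)
      · rw [h] at ih
        simp only [List.map_cons, List.flatten_cons]
        simp only [List.map_cons] at ih
        rw [pvJoin_append_head ['\n'] (pvH c) ((List.map pvH p).flatten)
              (List.map (fun l => (List.map pvH l).flatten) ps),
            ih hrest, pvEmit_eq c hc128 hc]

-- ===== VERDICT (by name: the statement is the Claim_ definition above) =====
theorem ironmaceHatesMe_spec : Claim_equal_ironmaceHatesMe := by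
  intro text hdom
  show ironmaceHatesMe text = ironmaceHatesMe_alt text
  unfold ironmaceHatesMe ironmaceHatesMe_alt
  simp only [PySem.List.foldl_append_singleton_eq_map, List.nil_append, pvSplitOn_eq]
  have hall : ∀ c ∈ PySem.Chars.lower text.toList, c.toNat < 128 := by
    intro c hc
    rw [PySem.Chars.lower, List.mem_map] at hc
    obtain ⟨d, hd, rfl⟩ := hc
    have hdom' : pvDomChar d = true := List.all_eq_true.mp hdom d hd
    have : d.toNat < 128 := by
      simp [pvDomChar] at hdom'; omega
    exact pvLowerChar_lt d this
  have h1 : ∀ l : List Char,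
      PySem.Chars.join []
        (List.map (fun c => if charToEmoji.contains c then charToEmoji.getD c [] else [c]) l) =
      (List.map pvH l).flatten := fun l => by rw [pvJoin_nil_flatten]; rfl
  simp only [h1]
  rw [pvMain _ hall, pvJoin_nil_flatten]
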